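-- pv_equiv track=rewrite | github.com/alexandraback/datacollection | solutions_5636311922769920_1/Python/gugugu/fractiles.py | _solve
-- ===== SOURCE A (Python) =====
-- def _solve(k, c, s):
--     res = set()
--     seen = [False for _ in range(k)]
--     def see():
--         for i in range(k):
--             if not seen[i]:
--                 seen[i] = True
--                 return i
--         return None
--
--     while not all(seen):
--         tile = 0
--         for i in range(c):
--             _tile = see()
--             if _tile == None:
--                 break
--             tile *= k
--             tile += _tile
--         res.add(tile + 1)
--
--     if len(res) > s:
--         return 'IMPOSSIBLE'
--     else:
--         return ' '.join(map(str, sorted(res)))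
-- ===== SOURCE B (Python) =====
-- def _solve(k, c, s):
--     # Build tiles directly: consecutive chunks of c indices, one pass, O(k).
--     tiles = []
--     i = 0
--     while i < k:
--         tile = 0
--         for d in range(i, min(i + c, k)):
--             tile = tile * k + d
--         tiles.append(tile + 1)
--         i += c
--     if len(tiles) > s:
--         return 'IMPOSSIBLE'
--     return ' '.join(map(str, sorted(tiles)))
-- ===== Notes on version B (the rewrite author's own statement) =====
-- stated objective: faster
-- what changed: B partitions indices 0..k-1 directly into consecutive chunks of c and computes each base-k tile in one pass over the indices, replacing A's repeated linear scans of the 'seen' array (and the set) with a simple arithmetic loop.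
import Mathlib
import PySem

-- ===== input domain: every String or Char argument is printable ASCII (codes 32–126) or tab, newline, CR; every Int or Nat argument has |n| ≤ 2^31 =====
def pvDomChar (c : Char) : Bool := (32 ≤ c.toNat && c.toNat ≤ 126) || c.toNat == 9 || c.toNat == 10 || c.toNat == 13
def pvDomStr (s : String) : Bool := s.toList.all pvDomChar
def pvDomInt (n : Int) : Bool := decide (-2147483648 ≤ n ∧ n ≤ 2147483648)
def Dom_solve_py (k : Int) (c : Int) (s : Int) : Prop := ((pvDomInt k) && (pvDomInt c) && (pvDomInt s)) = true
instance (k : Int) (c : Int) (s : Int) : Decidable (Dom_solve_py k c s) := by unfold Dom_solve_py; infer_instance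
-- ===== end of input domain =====

-- B builds the consecutive index chunks directly in one pass instead of A's repeated
-- linear scans of a 'seen' array; equivalence is proved on inputs where A terminates.

-- ===== PORT A =====
-- see(): scan 'seen' for the first False, set it True, return its index (none = all seen).
def seeA : List Bool → Option (Int × List Bool)
  | [] => none
  | b :: rest =>
    if b = false then some (0, true :: rest)
    else
      match seeA rest with
      | none => none
      | some (i, rest') => some (i + 1, b :: rest')

-- 'for i in range(c): _tile = see(); if _tile == None: break; tile = tile*k + _tile'
def innerA (k : Int) : Nat → Int → List Bool → Int × List Bool
  | 0, tile, seen => (tile, seen)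
  | n + 1, tile, seen =>
    match seeA seen with
    | none => (tile, seen)
    | some (i, seen') => innerA k n (tile * k + i) seen'

-- 'while not all(seen): … res.add(tile + 1)'; fuel = k.toNat bounds the iterations
-- (one new index is marked per iteration whenever the loop runs, inside Pre_).
def whileA (k : Int) (c : Nat) : Nat → List Bool → PySem.Set Int → PySem.Set Int
  | 0, _, res => res
  | f + 1, seen, res =>
    if seen.all (fun b => b) then res
    else
      let p := innerA k c 0 seen
      whileA k c f p.2 (PySem.Set.add res (p.1 + 1))

def solve_py (k : Int) (c : Int) (s : Int) : String :=
  let seen := List.replicate k.toNat false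
  let res := whileA k c.toNat k.toNat seen PySem.Set.empty
  if (PySem.Set.len res : Int) > s then "IMPOSSIBLE"
  else PySem.Str.join " " ((PySem.List.sorted res (fun x => x) false).map PySem.Int.toStr)

-- ===== PORT B =====
-- 'for d in range(i, min(i + c, k)): tile = tile * k + d'
def tileB (k : Int) (ds : List Int) : Int := ds.foldl (fun t d => t * k + d) 0

-- 'while i < k: tiles.append(tile + 1); i += c'
def loopB (k : Int) (c : Int) : Nat → Int → List Int
  | 0, _ => []
  | f + 1, i =>
    if i < k then (tileB k (PySem.List.pyRange i (min (i + c) k) 1) + 1) :: loopB k c f (i + c)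
    else []

def solve_py_alt (k : Int) (c : Int) (s : Int) : String :=
  let tiles := loopB k c k.toNat 0
  if (tiles.length : Int) > s then "IMPOSSIBLE"
  else PySem.Str.join " " ((PySem.List.sorted tiles (fun x => x) false).map PySem.Int.toStr)

-- ===== PRECONDITION & SPEC =====
-- Pre_ excludes k > 0 with c ≤ 0, where A's while loop never marks anything and DIVERGES
-- (A returns no value there); on every other input A returns normally.
def Pre_solve_py (k : Int) (c : Int) (s : Int) : Prop := k ≤ 0 ∨ 1 ≤ c
instance (k : Int) (c : Int) (s : Int) : Decidable (Pre_solve_py k c s) := by unfold Pre_solve_py; infer_instance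

def pvWitness_solve_py : Int × Int × Int := (10, 3, 5)

def Spec_solve_py (k : Int) (c : Int) (s : Int) (out : String) : Prop := out = solve_py_alt k c s
instance (k : Int) (c : Int) (s : Int) (out : String) : Decidable (Spec_solve_py k c s out) := by unfold Spec_solve_py; infer_instance

-- ===== CLAIM (what is proved, stated in full; the proofs are below) =====
def Claim_equal_solve_py : Prop := ∀ (k : Int) (c : Int) (s : Int), Dom_solve_py k c s → Pre_solve_py k c s → Spec_solve_py k c s (solve_py k c s)

-- ===== LEMMAS AND PROOFS =====

-- tval k t n a = the fold 't = t*k + d' over the n digits a, a+1, …, a+n-1.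
def tval (k : Int) : Int → Nat → Int → Int
  | t, 0, _ => t
  | t, n + 1, a => tval k (t * k + a) n (a + 1)

-- The abstract chunk list: values of consecutive chunks of ≤ c indices starting at m, r left.
def chunksF (k : Int) (c : Nat) : Nat → Nat → Int → List Int
  | 0, _, _ => []
  | f + 1, r, m =>
    if r = 0 then []
    else (tval k 0 (min c r) m + 1) :: chunksF k c f (r - min c r) (m + (min c r : Nat))

lemma chunksF_zero (k : Int) (c : Nat) (f : Nat) (m : Int) : chunksF k c f 0 m = [] := by
  cases f <;> simp [chunksF]


lemma seeA_state (m : Nat) (t : List Bool) :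
    seeA (List.replicate m true ++ false :: t) = some ((m : Int), List.replicate m true ++ true :: t) := by
  induction m with
  | zero => simp [seeA]
  | succ n ih =>
      simp only [List.replicate_succ, List.cons_append, seeA, ih]
      push_cast; ring_nf

lemma seeA_all_true (m : Nat) : seeA (List.replicate m true) = none := by
  induction m with
  | zero => rfl
  | succ n ih => simp [List.replicate_succ, seeA, ih]

lemma innerA_state (k : Int) (c m r : Nat) (tile : Int) :
    innerA k c tile (List.replicate m true ++ List.replicate r false) =
      (tval k tile (min c r) (m : Int),
       List.replicate (m + min c r) true ++ List.replicate (r - min c r) false) := by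
  induction c generalizing m r tile with
  | zero => simp [innerA, tval]
  | succ n ih =>
      cases r with
      | zero => simp [innerA, seeA_all_true, tval]
      | succ r' =>
          have h1 : List.replicate (r' + 1) false = false :: List.replicate r' false := rfl
          have h2 : List.replicate m true ++ true :: List.replicate r' false
              = List.replicate (m + 1) true ++ List.replicate r' false := by
            simp [List.replicate_succ' (n := m), List.append_assoc]
          rw [h1]
          simp only [innerA, seeA_state, h2, ih]
          have hmin : min (n + 1) (r' + 1) = min n r' + 1 := by omega
          rw [hmin]
          simp only [tval, Prod.mk.injEq]
          have e1 : m + 1 + min n r' = m + (min n r' + 1) := by omega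
          have e2 : r' - min n r' = r' + 1 - (min n r' + 1) := by omega
          exact ⟨by norm_cast, by rw [e1, e2]⟩

lemma tval_mod (k : Int) (n : Nat) (t a : Int) (hn : 1 ≤ n) (ha : 0 ≤ a) (h : a + n ≤ k) :
    PySem.Int.mod (tval k t n a) k = a + n - 1 := by
  induction n generalizing t a with
  | zero => omega
  | succ n ih =>
      cases Nat.eq_zero_or_pos n with
      | inl h0 =>
          subst h0
          have ht : tval k t (0 + 1) a = t * k + a := rfl
          have hk : (0 : Int) < k := by push_cast at h; omega
          rw [ht, PySem.Int.mod_eq_emod_of_pos hk, Int.add_comm, Int.add_mul_emod_self_right,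
            Int.emod_eq_of_lt ha (by push_cast at h; omega)]
          push_cast; ring
      | inr hpos =>
          have ht : tval k t (n + 1) a = tval k (t * k + a) n (a + 1) := rfl
          rw [ht, ih (t * k + a) (a + 1) (by omega) (by omega) (by push_cast at h ⊢; omega)]
          push_cast; ring

lemma chunksF_mod (k : Int) (c : Nat) (hc : 1 ≤ c) (f : Nat) :
    ∀ (r : Nat) (m : Int), 0 ≤ m → m + r ≤ k →
      ∀ x ∈ chunksF k c f r m, m ≤ PySem.Int.mod (x - 1) k ∧ PySem.Int.mod (x - 1) k < m + r := by
  induction f with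
  | zero => intro r m _ _ x hx; simp [chunksF] at hx
  | succ f ih =>
      intro r m hm hk x hx
      by_cases hr : r = 0
      · simp [chunksF, hr] at hx
      · simp only [chunksF, if_neg hr, List.mem_cons] at hx
        rcases hx with hx | hx
        · subst hx
          rw [Int.add_sub_cancel,
            tval_mod k (min c r) 0 m (by omega) hm (by push_cast; omega)]
          push_cast; omega
        · have := ih (r - min c r) (m + (min c r : Nat)) (by positivity)
            (by push_cast at hk ⊢; omega) x hx
          push_cast at this ⊢; omega

lemma all_replicate_state (m r : Nat) :
    (List.replicate m true ++ List.replicate r false).all (fun b => b) = (r = 0 : Bool) := by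
  cases r with
  | zero => simp
  | succ r' => simp [List.replicate_succ]

lemma whileA_state (k : Int) (c : Nat) (hc : 1 ≤ c) (f : Nat) :
    ∀ (r m : Nat) (res : PySem.Set Int), ((m : Int) + r ≤ k) → r ≤ f →
      (∀ x ∈ chunksF k c f r (m : Int), x ∉ res) →
      whileA k c f (List.replicate m true ++ List.replicate r false) res
        = res ++ chunksF k c f r (m : Int) := by
  induction f with
  | zero => intro r m res _ hr _; interval_cases r; simp [whileA, chunksF]
  | succ f ih =>
      intro r m res hk hr hfresh
      by_cases hr0 : r = 0
      · subst hr0; simp [whileA, chunksF]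
      · have hall : (List.replicate m true ++ List.replicate r false).all (fun b => b) = false := by
          rw [all_replicate_state]; simp [hr0]
        simp only [whileA, hall, Bool.false_eq_true, if_false, innerA_state]
        have hhead : tval k 0 (min c r) (m : Int) + 1 ∈ chunksF k c (f + 1) r (m : Int) := by
          simp [chunksF, hr0]
        have hstep : PySem.Set.add res (tval k 0 (min c r) (m : Int) + 1)
            = res ++ [tval k 0 (min c r) (m : Int) + 1] :=
          PySem.Set.add_of_not_mem (hfresh _ hhead)
        rw [hstep]
        have hcast : ((m + min c r : Nat) : Int) = (m : Int) + (min c r : Nat) := by push_cast; ring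
        have hfresh' : ∀ x ∈ chunksF k c f (r - min c r) ((m + min c r : Nat) : Int),
            x ∉ res ++ [tval k 0 (min c r) (m : Int) + 1] := by
          intro x hx
          rw [hcast] at hx
          have htail : x ∈ chunksF k c (f + 1) r (m : Int) := by
            simp only [chunksF, if_neg hr0]
            exact List.mem_cons_of_mem _ hx
          simp only [List.mem_append, List.mem_singleton]
          rintro (hres | hxhead)
          · exact hfresh _ htail hres
          · have h1 := (chunksF_mod k c hc f (r - min c r) ((m : Int) + (min c r : Nat))
              (by positivity) (by push_cast at hk ⊢; omega) _ hx).1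
            rw [hxhead, Int.add_sub_cancel,
              tval_mod k (min c r) 0 (m : Int) (by omega) (by positivity) (by push_cast at hk ⊢; omega)] at h1
            push_cast at h1; omega
        have ihr := ih (r - min c r) (m + min c r) (res ++ [tval k 0 (min c r) (m : Int) + 1])
          (by push_cast at hk ⊢; omega) (by omega) hfresh'
        rw [ihr, hcast]
        simp only [chunksF, if_neg hr0, List.append_assoc, List.singleton_append]

lemma tileB_eq_tval (k : Int) (n : Nat) : ∀ (t a : Int),
    (PySem.List.pyRange a (a + n) 1).foldl (fun t d => t * k + d) t = tval k t n a := by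
  induction n with
  | zero =>
      intro t a
      rw [show a + ((0 : Nat) : Int) = a by push_cast; ring,
        PySem.List.pyRange_one_eq_nil le_rfl]
      rfl
  | succ n ih =>
      intro t a
      rw [PySem.List.pyRange_one_cons (by omega)]
      simp only [List.foldl_cons]
      have : a + (n + 1 : Nat) = (a + 1) + (n : Nat) := by push_cast; ring
      rw [this, ih, tval]

lemma loopB_eq_chunksF (k : Int) (c : Int) (hc : 1 ≤ c) (f : Nat) :
    ∀ (m : Int) (r : Nat), (m + r = k ∨ (r = 0 ∧ k ≤ m)) →
      loopB k c f m = chunksF k c.toNat f r m := by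
  induction f with
  | zero => intro m r _; simp [loopB, chunksF]
  | succ f ih =>
      intro m r hinv
      by_cases hr : r = 0
      · have hmk : ¬ m < k := by omega
        simp [loopB, chunksF, hr, hmk]
      · have hmk : m < k := by omega
        have hk : m + (r : Int) = k := by omega
        simp only [loopB, if_pos hmk, chunksF, if_neg hr]
        have hmin : min (m + c) k = m + ((min c.toNat r : Nat) : Int) := by
          push_cast; omega
        rw [hmin]
        simp only [tileB, tileB_eq_tval]
        congr 1
        by_cases hcr : c.toNat ≤ r
        · rw [show min c.toNat r = c.toNat by omega,
            show ((c.toNat : Nat) : Int) = c by omega]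
          exact ih (m + c) (r - c.toNat) (Or.inl (by omega))
        · rw [show r - min c.toNat r = 0 by omega,
            ih (m + c) (r - c.toNat) (Or.inr ⟨by omega, by omega⟩),
            show r - c.toNat = 0 by omega, chunksF_zero, chunksF_zero]

-- ===== VERDICT (by name: the statement is the Claim_ definition above) =====
theorem solve_py_spec : Claim_equal_solve_py := by
  intro k c s _ hpre
  unfold Spec_solve_py
  by_cases hk : k ≤ 0
  · have h0 : k.toNat = 0 := by omega
    simp [solve_py, solve_py_alt, h0, whileA, loopB]
  · have hc : 1 ≤ c := by
      rcases hpre with h | h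
      · omega
      · exact h
    have hkt : ((k.toNat : Nat) : Int) = k := by omega
    have hA : whileA k c.toNat k.toNat (List.replicate k.toNat false) PySem.Set.empty
        = chunksF k c.toNat k.toNat k.toNat 0 := by
      have := whileA_state k c.toNat (by omega) k.toNat k.toNat 0 PySem.Set.empty
        (by omega) (le_refl _) (by intro x _ hx; simp [PySem.Set.empty] at hx)
      simpa [PySem.Set.empty] using this
    have hB : loopB k c k.toNat 0 = chunksF k c.toNat k.toNat k.toNat 0 := by
      exact loopB_eq_chunksF k c hc k.toNat 0 k.toNat (Or.inl (by omega))
    simp only [solve_py, solve_py_alt, hA, hB, PySem.Set.len]
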